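-- pv_equiv track=rewrite | github.com/carlsonmark/adventofcode | 2023/day3/day3b.py | find_all_gears
-- ===== SOURCE A (Python) =====
-- from typing import List, Optional, Tuple, Dict
--
-- def check_gear_pos(lines: List[str], line_no: int, position: int, gear_pos: Optional[Tuple[int, int]]) -> Optional[Tuple[int, int]]:
--     if gear_pos:
--         return gear_pos
--     try:
--         if lines[line_no][position] == '*':
--             gear_pos = (line_no, position)
--     except IndexError:
--         pass
--     return gear_pos
--
-- search_directions = (
--     (0, -1), (0, 0), (0, 1),
--     (1, -1),         (1, 1),
--     (2, -1), (2, 0), (2, 1)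
-- )
--
-- def find_gear_position(lines:List[str], line_number: int, position: int, gear_pos: Optional[Tuple[int, int]]) -> Optional[Tuple[int, int]]:
--     if gear_pos:
--         return gear_pos
--     for up_down, left_right in search_directions:
--         gear_pos = check_gear_pos(lines, line_number + up_down, position + left_right, gear_pos)
--     return gear_pos
--
-- def find_all_gears(lines: List[str]) -> Dict[Tuple[int, int], List[int]]:
--     gears = {}
--     for line_number, line in enumerate(lines[1:-1]):
--         pn_str = ''
--         gear_pos = None
--         for i, c in enumerate(line):
--             if c in '0123456789':
--                 # Check if this is next to a gear
--                 gear_pos = find_gear_position(lines, line_number, i, gear_pos)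
--                 # Append to the part number string
--                 pn_str += c
--             elif gear_pos is not None:
--                 # Done
--                 try:
--                     gears[gear_pos].append(int(pn_str))
--                 except KeyError:
--                     gears[gear_pos] = [int(pn_str)]
--                 pn_str = ''
--                 gear_pos = None
--             else:
--                 pn_str = ''
--         # Catch any last number in a line:
--         if gear_pos is not None:
--             try:
--                 gears[gear_pos].append(int(pn_str))
--             except KeyError:
--                 gears[gear_pos] = [int(pn_str)]
--     return gears
-- ===== SOURCE B (Python) =====
-- from typing import List, Optional, Tuple, Dict
--
--
-- def check_gear_pos(lines: List[str], line_no: int, position: int, gear_pos: Optional[Tuple[int, int]]) -> Optional[Tuple[int, int]]: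
--     if gear_pos:
--         return gear_pos
--     try:
--         if lines[line_no][position] == '*':
--             gear_pos = (line_no, position)
--     except IndexError:
--         pass
--     return gear_pos
--
--
-- search_directions = (
--     (0, -1), (0, 0), (0, 1),
--     (1, -1),         (1, 1),
--     (2, -1), (2, 0), (2, 1)
-- )
--
--
-- def find_gear_position(lines: List[str], line_number: int, position: int, gear_pos: Optional[Tuple[int, int]]) -> Optional[Tuple[int, int]]:
--     if gear_pos:
--         return gear_pos
--     for up_down, left_right in search_directions:
--         gear_pos = check_gear_pos(lines, line_number + up_down, position + left_right, gear_pos)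
--     return gear_pos
--
--
-- def find_all_gears(lines: List[str]) -> Dict[Tuple[int, int], List[int]]:
--     gears = {}
--     for line_number, line in enumerate(lines[1:-1]):
--         i, n = 0, len(line)
--         while i < n:
--             if not line[i].isdigit():
--                 i += 1
--                 continue
--             # maximal digit run line[i:j]
--             j = i
--             while j < n and line[j].isdigit():
--                 j += 1
--             gear_pos = None
--             for col in range(i, j):
--                 gear_pos = find_gear_position(lines, line_number, col, gear_pos)
--             if gear_pos is not None:
--                 gears.setdefault(gear_pos, []).append(int(line[i:j]))
--             i = j
--     return gears
-- ===== Notes on version B (the rewrite author's own statement) =====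
-- stated objective: alternative
-- what changed: A's per-character state machine threading pn_str/gear_pos with two flush sites is replaced by run-based processing: each maximal digit run is located with an index scan, its gear found by probing the run's columns, and recorded once with dict.setdefault.
import Mathlib
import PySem

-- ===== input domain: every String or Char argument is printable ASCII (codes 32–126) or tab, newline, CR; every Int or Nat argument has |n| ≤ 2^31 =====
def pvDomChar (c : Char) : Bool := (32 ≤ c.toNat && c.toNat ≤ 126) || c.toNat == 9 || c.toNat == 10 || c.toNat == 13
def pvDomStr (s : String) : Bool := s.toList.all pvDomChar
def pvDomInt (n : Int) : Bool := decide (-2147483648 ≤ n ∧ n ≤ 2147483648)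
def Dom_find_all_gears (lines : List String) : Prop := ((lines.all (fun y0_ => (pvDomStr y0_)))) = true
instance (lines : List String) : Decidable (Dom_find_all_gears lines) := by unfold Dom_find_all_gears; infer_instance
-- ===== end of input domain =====

-- B replaces A's per-character state machine (pn_str/gear_pos threading with two flush sites) by
-- run-based processing: locate each maximal digit run, probe its columns for a gear, record it once
-- (objective: alternative decomposition; both reuse the module's find_gear_position neighbour probe).

-- ===== PORT A =====

-- try: lines[line_no][position] ... except IndexError — pyGet? is exact (negative indices wrap, out of range = none)
def check_gear_pos (lines : List String) (line_no : Int) (position : Int)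
    (gear_pos : Option (Int × Int)) : Option (Int × Int) :=
  match gear_pos with
  | some g => some g
  | none =>
    match (PySem.List.pyGet? lines line_no).bind (fun row => PySem.Str.pyGet? row position) with
    | some ch => if ch = '*' then some (line_no, position) else none
    | none => none

def search_directions : List (Int × Int) :=
  [(0, -1), (0, 0), (0, 1), (1, -1), (1, 1), (2, -1), (2, 0), (2, 1)]

def find_gear_position (lines : List String) (line_number : Int) (position : Int)
    (gear_pos : Option (Int × Int)) : Option (Int × Int) :=
  match gear_pos with
  | some g => some g
  | none =>
    search_directions.foldl
      (fun g d => check_gear_pos lines (line_number + d.1) (position + d.2) g) none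

-- gears[gear_pos].append(int(pn_str)) with KeyError fallback gears[gear_pos] = [int(pn_str)]
def record_gear (gears : PySem.Dict (Int × Int) (List Int)) (gp : Int × Int) (v : Int) :
    PySem.Dict (Int × Int) (List Int) :=
  match gears.get? gp with
  | some _ => gears.modify gp [] (fun l => l ++ [v])
  | none => gears.insert gp [v]

-- the inner 'for i, c in enumerate(line)' loop; the base case is the trailing
-- 'if gear_pos is not None: ...' flush that follows the loop in Python.
-- int(pn_str): pn is a nonempty digit string whenever it is converted, so getD 0 is never used.
def line_loop (lines : List String) (ln : Int) (i : Int) (cs : List Char)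
    (pn : List Char) (g : Option (Int × Int)) (gears : PySem.Dict (Int × Int) (List Int)) :
    PySem.Dict (Int × Int) (List Int) :=
  match cs with
  | [] =>
    match g with
    | some gp => record_gear gears gp ((PySem.Int.ofChars? pn).getD 0)
    | none => gears
  | c :: rest =>
    if "0123456789".toList.contains c then
      line_loop lines ln (i + 1) rest (pn ++ [c]) (find_gear_position lines ln i g) gears
    else
      match g with
      | some gp => line_loop lines ln (i + 1) rest [] none (record_gear gears gp ((PySem.Int.ofChars? pn).getD 0))
      | none => line_loop lines ln (i + 1) rest [] none gears

def find_all_gears (lines : List String) : List (Int × Int × List Int) :=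
  let gears :=
    (PySem.List.enumerate (PySem.List.slice lines (some 1) (some (-1)))).foldl
      (fun gears p => line_loop lines p.1 0 p.2.toList [] none gears)
      PySem.Dict.empty
  gears.items.map (fun p => (p.1.1, p.1.2, p.2))

-- ===== PORT B =====

-- Source B's outer while over the line: skip a non-digit, or take the maximal digit run line[i:j]
-- (the inner 'while j < n and line[j].isdigit()' scan = takeWhile/dropWhile on the remaining chars),
-- probe the run's columns for a gear with the module's find_gear_position, and record once via
-- setdefault(...).append = insert gp (getD gp [] ++ [v]).
-- str.isdigit on one char is exactly '0' ≤ c ≤ '9' on the ASCII domain.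
def alt_line (lines : List String) (ln : Int) (i : Int) (cs : List Char)
    (gears : PySem.Dict (Int × Int) (List Int)) : PySem.Dict (Int × Int) (List Int) :=
  match cs with
  | [] => gears
  | c :: rest =>
    if decide ('0' ≤ c ∧ c ≤ '9') then
      let ds := c :: rest.takeWhile (fun d => decide ('0' ≤ d ∧ d ≤ '9'))
      let g := (PySem.List.pyRange i (i + (ds.length : Int)) 1).foldl
        (fun g col => find_gear_position lines ln col g) none
      let gears' :=
        match g with
        | some gp => gears.insert gp (gears.getD gp [] ++ [(PySem.Int.ofChars? ds).getD 0])
        | none => gears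
      alt_line lines ln (i + (ds.length : Int))
        (rest.dropWhile (fun d => decide ('0' ≤ d ∧ d ≤ '9'))) gears'
    else alt_line lines ln (i + 1) rest gears
termination_by cs.length
decreasing_by
  · simp only [List.length_cons]
    exact Nat.lt_succ_of_le (List.length_dropWhile_le _ _)
  · simp

def find_all_gears_alt (lines : List String) : List (Int × Int × List Int) :=
  let gears :=
    (PySem.List.enumerate (PySem.List.slice lines (some 1) (some (-1)))).foldl
      (fun gears p => alt_line lines p.1 0 p.2.toList gears)
      PySem.Dict.empty
  gears.items.map (fun p => (p.1.1, p.1.2, p.2))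

-- ===== PRECONDITION & SPEC =====
def Spec_find_all_gears (lines : List String) (out : List (Int × Int × List Int)) : Prop := out = find_all_gears_alt lines
instance (lines : List String) (out : List (Int × Int × List Int)) : Decidable (Spec_find_all_gears lines out) := by unfold Spec_find_all_gears; infer_instance

-- ===== CLAIM (what is proved, stated in full; the proofs are below) =====
def Claim_equal_find_all_gears : Prop := ∀ (lines : List String), Dom_find_all_gears lines → Spec_find_all_gears lines (find_all_gears lines)

-- ===== LEMMAS AND PROOFS =====

-- A's digit test ('c in "0123456789"') and B's (isdigit = '0' <= c <= '9') agree on every Char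
theorem digit_test_eq (c : Char) :
    ("0123456789".toList.contains c) = decide ('0' ≤ c ∧ c ≤ '9') := by
  have hl : "0123456789".toList = ['0','1','2','3','4','5','6','7','8','9'] := by decide
  have hcd : ∀ d : Char, (c = d) ↔ c.val.toNat = d.val.toNat := by
    intro d
    constructor
    · rintro rfl; rfl
    · intro h; exact Char.ext (UInt32.toNat_inj.mp h)
  rw [hl, Bool.eq_iff_iff]
  simp only [List.contains_cons, List.contains_nil, Bool.or_false, Bool.or_eq_true, beq_iff_eq,
    decide_eq_true_eq, Char.le_def, UInt32.le_iff_toNat_le, hcd,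
    show ('0':Char).val.toNat = 48 from rfl, show ('1':Char).val.toNat = 49 from rfl,
    show ('2':Char).val.toNat = 50 from rfl, show ('3':Char).val.toNat = 51 from rfl,
    show ('4':Char).val.toNat = 52 from rfl, show ('5':Char).val.toNat = 53 from rfl,
    show ('6':Char).val.toNat = 54 from rfl, show ('7':Char).val.toNat = 55 from rfl,
    show ('8':Char).val.toNat = 56 from rfl, show ('9':Char).val.toNat = 57 from rfl]
  omega

theorem record_gear_eq (gears : PySem.Dict (Int × Int) (List Int)) (gp : Int × Int) (v : Int) :
    record_gear gears gp v = gears.insert gp (gears.getD gp [] ++ [v]) := by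
  unfold record_gear
  rcases h : gears.get? gp with _ | l
  · rw [PySem.Dict.getD_of_get?_eq_none gears [] h]
    simp
  · simp [PySem.Dict.modify]

-- running A's loop across a block of digits appends them to pn and threads the probes of the
-- block's columns through gear_pos — exactly B's per-run column fold
theorem line_loop_digits (lines : List String) (ln : Int) :
    ∀ (ds rest : List Char) (i : Int) (pn : List Char) (g : Option (Int × Int))
      (gears : PySem.Dict (Int × Int) (List Int)),
      (∀ d ∈ ds, ('0' ≤ d ∧ d ≤ '9')) →
      line_loop lines ln i (ds ++ rest) pn g gears
        = line_loop lines ln (i + (ds.length : Int)) rest (pn ++ ds)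
            ((PySem.List.pyRange i (i + (ds.length : Int)) 1).foldl
              (fun g col => find_gear_position lines ln col g) g) gears := by
  intro ds
  induction ds with
  | nil =>
    intro rest i pn g gears _
    simp [pysem]
  | cons d ds ih =>
    intro rest i pn g gears hd
    have hdig : ("0123456789".toList.contains d) = true := by
      rw [digit_test_eq]; exact decide_eq_true (hd d (List.mem_cons_self))
    rw [List.cons_append]
    rw [line_loop.eq_def]
    simp only [hdig, if_true]
    rw [ih rest (i + 1) (pn ++ [d]) _ gears (fun x hx => hd x (List.mem_cons_of_mem d hx))]
    have hlen : i + (((d :: ds).length : Nat) : Int) = (i + 1) + (ds.length : Int) := by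
      simp [List.length_cons]; omega
    rw [hlen, show (pn ++ [d]) ++ ds = pn ++ (d :: ds) by simp,
      PySem.List.pyRange_one_cons (by omega : i < (i + 1) + (ds.length : Int)),
      List.foldl_cons]

-- head of dropWhile fails the predicate (glue for the run split)
theorem head_dropWhile_false {α : Type} (p : α → Bool) (c : α) (r : List α) :
    ∀ l : List α, l.dropWhile p = c :: r → p c = false := by
  intro l
  induction l with
  | nil => intro h; simp [List.dropWhile] at h
  | cons a l ih =>
    intro h
    rw [List.dropWhile_cons] at h
    by_cases hpa : p a = true
    · rw [if_pos hpa] at h; exact ih h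
    · rw [if_neg hpa] at h
      injection h with h1 _
      subst h1
      simpa using hpa

-- the key per-line equivalence: A's state machine = B's run-based processing
theorem line_eq_runs (lines : List String) (ln : Int) :
    ∀ (n : Nat) (cs : List Char), cs.length = n →
      ∀ (i : Int) (gears : PySem.Dict (Int × Int) (List Int)),
      line_loop lines ln i cs [] none gears = alt_line lines ln i cs gears := by
  intro n
  induction n using Nat.strong_induction_on with
  | _ n ih =>
    intro cs hn i gears
    match cs with
    | [] => simp [line_loop, alt_line]
    | c :: rest =>
      rw [List.length_cons] at hn
      by_cases hc : ('0' ≤ c ∧ c ≤ '9')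
      · -- a digit run starts here
        set p : Char → Bool := fun d => decide ('0' ≤ d ∧ d ≤ '9') with hp
        set ds := c :: rest.takeWhile p with hds
        have hsplit : c :: rest = ds ++ rest.dropWhile p := by
          rw [hds, List.cons_append, List.takeWhile_append_dropWhile]
        have hall : ∀ d ∈ ds, ('0' ≤ d ∧ d ≤ '9') := by
          intro d hdm
          rcases List.mem_cons.mp hdm with rfl | hdm
          · exact hc
          · have hpd := List.mem_takeWhile_imp hdm
            rw [hp] at hpd
            exact of_decide_eq_true hpd
        have hlen : (rest.dropWhile p).length ≤ rest.length := List.length_dropWhile_le _ _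
        have halt : alt_line lines ln i (c :: rest) gears
            = alt_line lines ln (i + (ds.length : Int)) (rest.dropWhile p)
                (match (PySem.List.pyRange i (i + (ds.length : Int)) 1).foldl
                    (fun g col => find_gear_position lines ln col g) none with
                 | some gp => gears.insert gp (gears.getD gp [] ++ [(PySem.Int.ofChars? ds).getD 0])
                 | none => gears) := by
          rw [alt_line.eq_def]
          simp only [hc, and_self, decide_true, if_true]
          rw [← hp, ← hds]
        rw [halt, hsplit,
          line_loop_digits lines ln ds (rest.dropWhile p) i [] none gears hall,
          List.nil_append]
        set g := (PySem.List.pyRange i (i + (ds.length : Int)) 1).foldl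
          (fun g col => find_gear_position lines ln col g) none with hg
        rcases htl : rest.dropWhile p with _ | ⟨c', rest'⟩
        · -- the run ends the line: A's trailing flush vs B's recorded-then-done
          rw [line_loop.eq_def, alt_line.eq_def]
          rcases g with _ | gp <;> simp [record_gear_eq]
        · have hnd : ¬ ('0' ≤ c' ∧ c' ≤ '9') := by
            have := head_dropWhile_false p c' rest' rest htl
            rw [hp] at this
            exact of_decide_eq_false this
          have hndig : ("0123456789".toList.contains c') = false := by
            rw [digit_test_eq]; exact decide_eq_false hnd
          have halt2 : ∀ gs, alt_line lines ln (i + (ds.length : Int)) (c' :: rest') gs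
              = alt_line lines ln (i + (ds.length : Int) + 1) rest' gs := by
            intro gs
            rw [alt_line.eq_def]
            simp only [hnd, decide_false, Bool.false_eq_true, if_false]
          have hlen' : rest'.length < n := by
            rw [htl] at hlen
            rw [List.length_cons] at hlen
            omega
          rw [line_loop.eq_def]
          simp only [hndig, Bool.false_eq_true, if_false]
          rcases g with _ | gp
          · rw [halt2]
            exact ih rest'.length hlen' rest' rfl _ _
          · rw [halt2]
            simp only [record_gear_eq]
            exact ih rest'.length hlen' rest' rfl _ _
      · -- not a digit: both sides skip the character
        have hndig : ("0123456789".toList.contains c) = false := by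
          rw [digit_test_eq]; exact decide_eq_false hc
        rw [line_loop.eq_def, alt_line.eq_def]
        simp only [hndig, hc, decide_false, Bool.false_eq_true, if_false]
        exact ih rest.length (by omega) rest rfl (i + 1) gears

-- ===== VERDICT (by name: the statement is the Claim_ definition above) =====
theorem find_all_gears_spec : Claim_equal_find_all_gears := by
  intro lines _
  unfold Spec_find_all_gears find_all_gears find_all_gears_alt
  have h : (PySem.List.enumerate (PySem.List.slice lines (some 1) (some (-1)))).foldl
      (fun gears p => line_loop lines p.1 0 p.2.toList [] none gears) PySem.Dict.empty
      = (PySem.List.enumerate (PySem.List.slice lines (some 1) (some (-1)))).foldl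
        (fun gears p => alt_line lines p.1 0 p.2.toList gears) PySem.Dict.empty := by
    apply PySem.List.foldl_congr_mem
    intro gears p _
    exact line_eq_runs lines p.1 p.2.toList.length p.2.toList rfl 0 gears
  rw [h]
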